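-- pv_equiv track=rewrite | github.com/alchemyst/adventofcode | 2025/10/solve.py | search
-- ===== SOURCE A (Python) =====
-- def apply(button, state):
--     return tuple(s ^ (i in button) for i, s in enumerate(state))
--
-- def search(start, target, buttons):
--     queue = [start]
--     seen = {start}
--     steps = {start: 0}
--
--     while queue:
--         state = queue.pop(0)
--         if state == target:
--             return steps[state]
--         for button in buttons:
--             new_state = apply(button, state)
--             if new_state in seen:
--                 continue
--
--             seen.add(new_state)
--             steps[new_state] = steps[state] + 1
--             queue.append(new_state)
-- ===== SOURCE B (Python) =====
-- # Order of button presses never matters (each press XORs a fixed mask) and pressing a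
-- # button twice cancels, so the BFS distance equals the smallest number of DISTINCT
-- # buttons whose combined toggle mask turns start into target.  B therefore does no
-- # graph search at all: it enumerates button subsets by increasing size.
--
-- def combos(items, k):
--     if k == 0:
--         return [[]]
--     if not items:
--         return []
--     rest = items[1:]
--     return [[items[0]] + c for c in combos(rest, k - 1)] + combos(rest, k)
--
--
-- def search(start, target, buttons):
--     n = len(start)
--     if len(target) != n:
--         return None
--     masks = [[i in b for i in range(n)] for b in buttons]
--     diff = [s != t for s, t in zip(start, target)]
--     for k in range(len(buttons) + 1):
--         for combo in combos(masks, k):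
--             acc = diff
--             for m in combo:
--                 acc = [a != x for a, x in zip(acc, m)]
--             if not any(acc):
--                 return k
--     return None
-- ===== Notes on version B (the rewrite author's own statement) =====
-- stated objective: alternative
-- what changed: Replaced the BFS over toggle-states (queue, seen set, steps dict) with no search at all: since button presses are commuting XOR masks and pressing twice cancels, the shortest-path length equals the smallest button subset whose masks XOR to start^target, so B precomputes each button's mask and enumerates subsets by increasing size.
import Mathlib
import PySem

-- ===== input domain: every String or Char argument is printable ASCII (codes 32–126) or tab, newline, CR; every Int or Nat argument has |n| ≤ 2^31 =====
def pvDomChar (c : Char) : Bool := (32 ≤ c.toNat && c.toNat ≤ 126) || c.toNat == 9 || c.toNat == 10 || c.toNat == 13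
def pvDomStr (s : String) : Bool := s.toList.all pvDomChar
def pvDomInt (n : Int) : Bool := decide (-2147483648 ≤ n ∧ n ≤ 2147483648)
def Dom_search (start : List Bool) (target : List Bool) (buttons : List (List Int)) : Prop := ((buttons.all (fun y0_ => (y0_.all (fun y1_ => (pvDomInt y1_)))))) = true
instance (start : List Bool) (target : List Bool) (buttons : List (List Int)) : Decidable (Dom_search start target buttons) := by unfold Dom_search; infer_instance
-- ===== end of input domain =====

-- A does a BFS over toggle-states; B does no search at all: button presses are commuting,
-- self-cancelling XOR masks, so the BFS distance equals the smallest button subset whose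
-- masks XOR to start^target, and B enumerates subsets by increasing size (objective: alternative).

-- ===== PORT A =====
-- apply(button, state)
def pyApply (button : List Int) (state : List Bool) : List Bool :=
  (PySem.List.enumerate state).map (fun p => xor p.2 (decide (p.1 ∈ button)))

-- body of A's inner `for button in buttons` loop; acc = (queue, seen, steps)
def innerA (state : List Bool)
    (acc : List (List Bool) × PySem.Set (List Bool) × PySem.Dict (List Bool) Int)
    (button : List Int) :
    List (List Bool) × PySem.Set (List Bool) × PySem.Dict (List Bool) Int :=
  let ns := pyApply button state
  if PySem.Set.contains acc.2.1 ns then acc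
  else (acc.1 ++ [ns], PySem.Set.add acc.2.1 ns, acc.2.2.insert ns (acc.2.2.getD state 0 + 1))

-- A's while loop. Fuel only makes the recursion total: `none` = fuel ran out (unreachable at
-- the fuel used in `search`, lemma loopA_ne_none below); `some r` = the Python returns r.
-- steps[state] is ported as getD _ 0: exact here, every enqueued state is inserted into steps.
def loopA (target : List Bool) (buttons : List (List Int)) :
    Nat → List (List Bool) → PySem.Set (List Bool) → PySem.Dict (List Bool) Int →
    Option (Option Int)
  | 0, _, _, _ => none
  | f + 1, queue, seen, steps =>
    match queue with
    | [] => some none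
    | state :: rest =>
      if state = target then some (some (steps.getD state 0))
      else
        let acc := buttons.foldl (innerA state) (rest, seen, steps)
        loopA target buttons f acc.1 acc.2.1 acc.2.2

def search (start : List Bool) (target : List Bool) (buttons : List (List Int)) : Option Int :=
  match loopA target buttons (2 ^ start.length + 2) [start]
      (PySem.Set.ofList [start]) (PySem.Dict.ofList [(start, 0)]) with
  | some r => r
  | none => none

-- ===== PORT B =====
-- acc = [a != x for a, x in zip(acc, m)]  (and diff = [s != t for s, t in zip(start, target)])
def xorRow (a : List Bool) (b : List Bool) : List Bool :=
  List.zipWith (fun x y => x != y) a b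

-- combos(items, k) from Source B, transliterated
def combos {α : Type} : List α → Nat → List (List α)
  | _, 0 => [[]]
  | [], _ + 1 => []
  | x :: rest, k + 1 =>
    (combos rest k).map (fun c => x :: c) ++ combos rest (k + 1)

-- B's outer `for k in range(len(buttons) + 1)` loop; the inner `for combo … return k`
-- is the `any` over the combos of size k
def findK (masks : List (List Bool)) (diff : List Bool) : List Nat → Option Int
  | [] => none
  | k :: ks =>
    if (combos masks k).any (fun c => !((c.foldl xorRow diff).any (fun x => x)))
    then some (k : Int) else findK masks diff ks

def search_alt (start : List Bool) (target : List Bool) (buttons : List (List Int)) : Option Int :=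
  if target.length ≠ start.length then none
  else
    let masks := buttons.map (fun b => (List.range start.length).map (fun i => decide ((i : Int) ∈ b)))
    let diff := List.zipWith (fun s t => s != t) start target
    findK masks diff (List.range (buttons.length + 1))

-- ===== PRECONDITION & SPEC =====
def Spec_search (start : List Bool) (target : List Bool) (buttons : List (List Int)) (out : Option Int) : Prop := out = search_alt start target buttons
instance (start : List Bool) (target : List Bool) (buttons : List (List Int)) (out : Option Int) : Decidable (Spec_search start target buttons out) := by unfold Spec_search; infer_instance

-- ===== CLAIM (what is proved, stated in full; the proofs are below) =====
def Claim_equal_search : Prop := ∀ (start : List Bool) (target : List Bool) (buttons : List (List Int)), Dom_search start target buttons → Spec_search start target buttons (search start target buttons)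

-- ===== LEMMAS AND PROOFS =====

theorem length_pyApply (b : List Int) (s : List Bool) : (pyApply b s).length = s.length := by
  simp [pyApply, PySem.List.length_enumerate]

-- ---------- proof-side abstract layered BFS (used to analyse A's loop) ----------

-- pure expansion of one state by all buttons: (final seen, freshly discovered states in order)
def expandOne : List (List Int) → PySem.Set (List Bool) → List Bool →
    PySem.Set (List Bool) × List (List Bool)
  | [], sn, _ => (sn, [])
  | b :: bs, sn, state =>
    if pyApply b state ∈ sn then expandOne bs sn state
    else ((expandOne bs (sn ++ [pyApply b state]) state).1,
          pyApply b state :: (expandOne bs (sn ++ [pyApply b state]) state).2)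

-- expansion of a whole frontier
def expandAll : List (List Int) → PySem.Set (List Bool) → List (List Bool) →
    PySem.Set (List Bool) × List (List Bool)
  | _, sn, [] => (sn, [])
  | bs, sn, x :: xs =>
    ((expandAll bs (expandOne bs sn x).1 xs).1,
     (expandOne bs sn x).2 ++ (expandAll bs (expandOne bs sn x).1 xs).2)

-- the level-synchronised loop: frontier, seen, depth
def loopB (target : List Bool) (buttons : List (List Int)) :
    Nat → List (List Bool) → PySem.Set (List Bool) → Int → Option (Option Int)
  | 0, _, _, _ => none
  | f + 1, frontier, seen, depth =>
    match frontier with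
    | [] => some none
    | _ :: _ =>
      let acc := expandAll buttons seen frontier
      if target ∈ acc.2 then some (some (depth + 1))
      else loopB target buttons f acc.2 acc.1 (depth + 1)

def levelSearch (start : List Bool) (target : List Bool) (buttons : List (List Int)) : Option Int :=
  if start = target then some 0
  else
    match loopB target buttons (2 ^ start.length + 2) [start] (PySem.Set.ofList [start]) 0 with
    | some r => r
    | none => none

theorem expandOne_fst : ∀ (bs : List (List Int)) (sn : PySem.Set (List Bool)) (state : List Bool),
    (expandOne bs sn state).1 = sn ++ (expandOne bs sn state).2 := by
  intro bs
  induction bs with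
  | nil => intro sn state; simp [expandOne]
  | cons b bs ih =>
    intro sn state
    simp only [expandOne]
    split
    · exact ih sn state
    · rw [ih (sn ++ [pyApply b state]) state]; simp

theorem expandAll_fst : ∀ (fr : List (List Bool)) (bs : List (List Int)) (sn : PySem.Set (List Bool)),
    (expandAll bs sn fr).1 = sn ++ (expandAll bs sn fr).2 := by
  intro fr
  induction fr with
  | nil => intro bs sn; simp [expandAll]
  | cons x fr ih =>
    intro bs sn
    simp only [expandAll]
    rw [ih bs (expandOne bs sn x).1, expandOne_fst bs sn x]
    simp

theorem expandOne_sound (n : Nat) : ∀ (bs : List (List Int)) (sn : PySem.Set (List Bool)) (state : List Bool),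
    sn.Nodup → (∀ y ∈ sn, y.length = n) → state.length = n →
    (expandOne bs sn state).1.Nodup ∧ (∀ y ∈ (expandOne bs sn state).1, y.length = n) := by
  intro bs
  induction bs with
  | nil => intro sn state hnd hlen _; exact ⟨hnd, hlen⟩
  | cons b bs ih =>
    intro sn state hnd hlen hst
    simp only [expandOne]
    split
    · exact ih sn state hnd hlen hst
    · rename_i hns
      refine ih (sn ++ [pyApply b state]) state ?_ ?_ hst
      · refine List.Nodup.append hnd (List.nodup_singleton _) ?_
        intro a ha hb
        simp only [List.mem_singleton] at hb
        exact hns (hb ▸ ha)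
      · intro y hy
        rcases List.mem_append.mp hy with h | h
        · exact hlen y h
        · simp only [List.mem_singleton] at h
          subst h; rw [length_pyApply]; exact hst

theorem expandAll_sound (n : Nat) : ∀ (fr : List (List Bool)) (bs : List (List Int)) (sn : PySem.Set (List Bool)),
    sn.Nodup → (∀ y ∈ sn, y.length = n) → (∀ x ∈ fr, x.length = n) →
    (expandAll bs sn fr).1.Nodup ∧ (∀ y ∈ (expandAll bs sn fr).1, y.length = n) := by
  intro fr
  induction fr with
  | nil => intro bs sn hnd hlen _; exact ⟨hnd, hlen⟩
  | cons x fr ih =>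
    intro bs sn hnd hlen hfr
    simp only [expandAll]
    obtain ⟨h1, h2⟩ := expandOne_sound n bs sn x hnd hlen (hfr x (by simp))
    exact ih bs (expandOne bs sn x).1 h1 h2 (fun y hy => hfr y (by simp [hy]))

-- A's inner button fold: same seen/new states as expandOne, and what happens to steps
theorem foldA_spec (state : List Bool) (d : Int) :
    ∀ (bs : List (List Int)) (q : List (List Bool)) (sn : PySem.Set (List Bool)) (st : PySem.Dict (List Bool) Int),
    state ∈ sn → st.getD state 0 = d →
    ∃ st' : PySem.Dict (List Bool) Int,
      bs.foldl (innerA state) (q, sn, st) =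
        (q ++ (expandOne bs sn state).2, (expandOne bs sn state).1, st') ∧
      (∀ y ∈ sn, st'.getD y 0 = st.getD y 0) ∧
      (∀ y ∈ (expandOne bs sn state).2, st'.getD y 0 = d + 1) := by
  intro bs
  induction bs with
  | nil =>
    intro q sn st hmem hd
    exact ⟨st, by simp [expandOne], fun y _ => rfl, fun y hy => by simp [expandOne] at hy⟩
  | cons b bs ih =>
    intro q sn st hmem hd
    simp only [List.foldl_cons]
    by_cases hm : pyApply b state ∈ sn
    · have h1 : innerA state (q, sn, st) b = (q, sn, st) := by simp [innerA, hm]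
      rw [h1]
      simp only [expandOne, if_pos hm]
      exact ih q sn st hmem hd
    · have hne : state ≠ pyApply b state := fun h => hm (h ▸ hmem)
      have h1 : innerA state (q, sn, st) b =
          (q ++ [pyApply b state], sn ++ [pyApply b state],
           st.insert (pyApply b state) (d + 1)) := by
        simp [innerA, hm, hd]
      rw [h1]
      obtain ⟨st', heq, hold, hnew⟩ := ih (q ++ [pyApply b state]) (sn ++ [pyApply b state])
        (st.insert (pyApply b state) (d + 1)) (by simp [hmem])
        (by rw [PySem.Dict.getD_insert_of_ne st _ _ hne]; exact hd)
      refine ⟨st', ?_, ?_, ?_⟩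
      · rw [heq]
        simp only [expandOne, if_neg hm]
        simp
      · intro y hy
        rw [hold y (by simp [hy]), PySem.Dict.getD_insert_of_ne st _ _ (fun h => hm (by rw [← h]; exact hy))]
      · intro y hy
        simp only [expandOne, if_neg hm, List.mem_cons] at hy
        rcases hy with h | h
        · rw [h, hold (pyApply b state) (by simp), PySem.Dict.getD_insert_self]
        · exact hnew y h

-- the queue component of A's fold only grows at the back
theorem foldA_shape (state : List Bool) : ∀ (bs : List (List Int)) (q : List (List Bool)) (sn : PySem.Set (List Bool)) (st : PySem.Dict (List Bool) Int),
    ∃ q' sn' st', bs.foldl (innerA state) (q, sn, st) = (q ++ q', sn', st') := by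
  intro bs
  induction bs with
  | nil => intro q sn st; exact ⟨[], sn, st, by simp⟩
  | cons b bs ih =>
    intro q sn st
    simp only [List.foldl_cons]
    by_cases hm : pyApply b state ∈ sn
    · have h1 : innerA state (q, sn, st) b = (q, sn, st) := by simp [innerA, hm]
      rw [h1]; exact ih q sn st
    · have h1 : innerA state (q, sn, st) b =
          (q ++ [pyApply b state], PySem.Set.add sn (pyApply b state),
           st.insert (pyApply b state) (st.getD state 0 + 1)) := by
        simp [innerA, hm]
      rw [h1]
      obtain ⟨q', sn', st', h⟩ := ih (q ++ [pyApply b state]) _ _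
      exact ⟨[pyApply b state] ++ q', sn', st', by rw [h]; simp⟩

-- with too little fuel for the current layer, loopA exhausts its fuel
theorem loopA_short (target : List Bool) (bs : List (List Int)) :
    ∀ (fA : Nat) (cur pend : List (List Bool)) (sn : PySem.Set (List Bool)) (st : PySem.Dict (List Bool) Int),
    fA < cur.length → target ∉ cur →
    loopA target bs fA (cur ++ pend) sn st = none := by
  intro fA
  induction fA with
  | zero => intro cur pend sn st hlt hnt; rfl
  | succ fA ih =>
    intro cur pend sn st hlt hnt
    cases cur with
    | nil => simp at hlt
    | cons x cur =>
      have hx : x ≠ target := fun h => hnt (by simp [h])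
      simp only [List.cons_append, loopA]
      rw [if_neg hx]
      obtain ⟨q', sn', st', h⟩ := foldA_shape x bs (cur ++ pend) sn st
      rw [h]
      have := ih cur (pend ++ q') sn' st' (by simp at hlt ⊢; omega)
        (fun hc => hnt (by simp [hc]))
      simpa [List.append_assoc] using this

-- A pops one whole layer: cur ++ pend becomes pend ++ fresh states, seen/steps updated
theorem loopA_layer (target : List Bool) (bs : List (List Int)) (d : Int) :
    ∀ (cur pend : List (List Bool)) (f : Nat) (sn : PySem.Set (List Bool)) (st : PySem.Dict (List Bool) Int),
    target ∉ cur → (∀ x ∈ cur, x ∈ sn) → (∀ x ∈ cur, st.getD x 0 = d) →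
    ∃ st',
      loopA target bs (cur.length + f) (cur ++ pend) sn st =
        loopA target bs f (pend ++ (expandAll bs sn cur).2) (expandAll bs sn cur).1 st' ∧
      (∀ y ∈ sn, st'.getD y 0 = st.getD y 0) ∧
      (∀ y ∈ (expandAll bs sn cur).2, st'.getD y 0 = d + 1) := by
  intro cur
  induction cur with
  | nil =>
    intro pend f sn st _ _ _
    refine ⟨st, ?_, fun y _ => rfl, ?_⟩
    · simp [expandAll]
    · intro y hy; simp [expandAll] at hy
  | cons x cur ih =>
    intro pend f sn st hnt hsub hd'
    have hx : x ≠ target := fun h => hnt (by simp [h])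
    have hfuel : (x :: cur).length + f = (cur.length + f) + 1 := by
      simp [List.length_cons]; omega
    rw [hfuel]
    simp only [List.cons_append, loopA]
    rw [if_neg hx]
    obtain ⟨st₁, hfold, hold1, hnew1⟩ :=
      foldA_spec x d bs (cur ++ pend) sn st (hsub x (by simp)) (hd' x (by simp))
    rw [hfold]
    obtain ⟨st'', heq2, hold2, hnew2⟩ :=
      ih (pend ++ (expandOne bs sn x).2) f (expandOne bs sn x).1 st₁
        (fun h => hnt (by simp [h]))
        (fun y hy => by
          rw [expandOne_fst]; exact List.mem_append_left _ (hsub y (by simp [hy])))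
        (fun y hy => by
          rw [hold1 y (hsub y (by simp [hy]))]; exact hd' y (by simp [hy]))
    refine ⟨st'', ?_, ?_, ?_⟩
    · dsimp only
      rw [List.append_assoc, heq2]
      simp only [expandAll]
      simp [List.append_assoc]
    · intro y hy
      rw [hold2 y (by rw [expandOne_fst]; exact List.mem_append_left _ hy), hold1 y hy]
    · intro y hy
      simp only [expandAll] at hy
      rcases List.mem_append.mp hy with h | h
      · rw [hold2 y (by rw [expandOne_fst]; exact List.mem_append_right _ h)]
        exact hnew1 y h
      · exact hnew2 y h

-- once the target sits in the queue with recorded distance v, loopA returns v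
theorem loopA_found (target : List Bool) (bs : List (List Int)) (v : Int) :
    ∀ (f : Nat) (queue : List (List Bool)) (sn : PySem.Set (List Bool)) (st : PySem.Dict (List Bool) Int) (r : Option Int),
    target ∈ queue → (∀ x ∈ queue, x ∈ sn) → st.getD target 0 = v →
    loopA target bs f queue sn st = some r → r = some v := by
  intro f
  induction f with
  | zero => intro queue sn st r _ _ _ h; simp [loopA] at h
  | succ f ih =>
    intro queue sn st r hq hs hv h
    cases queue with
    | nil => simp at hq
    | cons x rest =>
      by_cases hx : x = target
      · simp only [loopA] at h
        rw [if_pos hx] at h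
        have : r = some (st.getD x 0) := by
          cases h; rfl
        rw [this, hx, hv]
      · simp only [loopA] at h
        rw [if_neg hx] at h
        obtain ⟨st₁, hfold, hold1, _⟩ :=
          foldA_spec x (st.getD x 0) bs rest sn st (hs x (by simp)) rfl
        rw [hfold] at h
        have htr : target ∈ rest := by
          rcases List.mem_cons.mp hq with h' | h'
          · exact absurd h'.symm hx
          · exact h'
        refine ih _ _ _ _ (List.mem_append_left _ htr) ?_ ?_ h
        · intro y hy
          rw [expandOne_fst]
          rcases List.mem_append.mp hy with h' | h'
          · exact List.mem_append_left _ (hs y (by simp [h']))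
          · exact List.mem_append_right _ h'
        · rw [hold1 target (hs target hq)]
          exact hv

def allB : Nat → List (List Bool)
  | 0 => [[]]
  | n + 1 => (allB n).map (false :: ·) ++ (allB n).map (true :: ·)

theorem length_allB : ∀ n, (allB n).length = 2 ^ n := by
  intro n
  induction n with
  | zero => rfl
  | succ n ih => simp [allB, ih, pow_succ]; omega

theorem mem_allB : ∀ (n : Nat) (l : List Bool), l.length = n → l ∈ allB n := by
  intro n
  induction n with
  | zero =>
    intro l h
    rw [List.length_eq_zero_iff] at h
    subst h; simp [allB]
  | succ n ih =>
    intro l h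
    cases l with
    | nil => simp at h
    | cons b t =>
      have ht : t ∈ allB n := ih t (by simpa using h)
      simp only [allB, List.mem_append, List.mem_map]
      cases b
      · exact Or.inl ⟨t, ht, rfl⟩
      · exact Or.inr ⟨t, ht, rfl⟩

theorem card_le_pow (n : Nat) (sn : List (List Bool)) (hnd : sn.Nodup)
    (hlen : ∀ y ∈ sn, y.length = n) : sn.length ≤ 2 ^ n := by
  have h := (hnd.subperm (fun y hy => mem_allB n y (hlen y hy))).length_le
  rwa [length_allB] at h

theorem loopA_ne_none (target : List Bool) (bs : List (List Int)) (n : Nat) :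
    ∀ (f : Nat) (queue : List (List Bool)) (sn : PySem.Set (List Bool)) (st : PySem.Dict (List Bool) Int),
    sn.Nodup → (∀ y ∈ sn, y.length = n) → (∀ x ∈ queue, x ∈ sn) →
    queue.length + 2 ^ n + 1 ≤ f + sn.length →
    loopA target bs f queue sn st ≠ none := by
  intro f
  induction f with
  | zero =>
    intro queue sn st hnd hlen hq hle
    have := card_le_pow n sn hnd hlen
    exact (by omega : False).elim
  | succ f ih =>
    intro queue sn st hnd hlen hq hle
    cases queue with
    | nil => simp [loopA]
    | cons x rest =>
      by_cases hx : x = target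
      · simp [loopA, hx]
      · simp only [loopA]
        rw [if_neg hx]
        obtain ⟨st₁, hfold, _, _⟩ :=
          foldA_spec x (st.getD x 0) bs rest sn st (hq x (by simp)) rfl
        rw [hfold]
        dsimp only
        have hxlen : x.length = n := hlen x (hq x (by simp))
        obtain ⟨hnd', hlen'⟩ := expandOne_sound n bs sn x hnd hlen hxlen
        have hE : (expandOne bs sn x).1.length
            = sn.length + (expandOne bs sn x).2.length := by
          rw [expandOne_fst]; simp
        apply ih _ _ _ hnd' hlen'
        · intro y hy
          rw [expandOne_fst]
          rcases List.mem_append.mp hy with h' | h'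
          · exact List.mem_append_left _ (hq y (by simp [h']))
          · exact List.mem_append_right _ h'
        · simp only [List.length_append]
          simp only [List.length_cons] at hle
          omega

theorem loopB_ne_none (target : List Bool) (bs : List (List Int)) (n : Nat) :
    ∀ (f : Nat) (frontier : List (List Bool)) (sn : PySem.Set (List Bool)) (d : Int),
    sn.Nodup → (∀ y ∈ sn, y.length = n) → (∀ x ∈ frontier, x ∈ sn) →
    2 ^ n + 2 ≤ f + sn.length →
    loopB target bs f frontier sn d ≠ none := by
  intro f
  induction f with
  | zero =>
    intro frontier sn d hnd hlen hq hle
    have := card_le_pow n sn hnd hlen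
    exact (by omega : False).elim
  | succ f ih =>
    intro frontier sn d hnd hlen hq hle
    cases frontier with
    | nil => simp [loopB]
    | cons x fr =>
      simp only [loopB]
      by_cases ht : target ∈ (expandAll bs sn (x :: fr)).2
      · simp [ht]
      · rw [if_neg ht]
        obtain ⟨hnd', hlen'⟩ :=
          expandAll_sound n (x :: fr) bs sn hnd hlen (fun y hy => hlen y (hq y hy))
        have hcard := card_le_pow n sn hnd hlen
        have hE : (expandAll bs sn (x :: fr)).1.length
            = sn.length + (expandAll bs sn (x :: fr)).2.length := by
          rw [expandAll_fst]; simp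
        cases hE2 : (expandAll bs sn (x :: fr)).2 with
        | nil =>
          have hf : 1 ≤ f := by omega
          cases f with
          | zero => omega
          | succ g => simp [loopB]
        | cons z zs =>
          apply ih _ _ _ hnd' hlen'
          · intro y hy
            rw [expandAll_fst, hE2]
            exact List.mem_append_right _ hy
          · rw [hE2] at hE
            simp only [List.length_cons] at hE
            omega

-- the simulation: at a layer boundary A's dequeue loop and the layered loop agree
theorem loopAB (target : List Bool) (bs : List (List Int)) :
    ∀ (fB fA : Nat) (frontier : List (List Bool)) (sn : PySem.Set (List Bool)) (st : PySem.Dict (List Bool) Int)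
      (d : Int) (r r' : Option Int),
    target ∉ frontier → (∀ x ∈ frontier, x ∈ sn) → (∀ x ∈ frontier, st.getD x 0 = d) →
    loopA target bs fA frontier sn st = some r → loopB target bs fB frontier sn d = some r' →
    r = r' := by
  intro fB
  induction fB with
  | zero =>
    intro fA frontier sn st d r r' _ _ _ _ hB
    simp [loopB] at hB
  | succ fB ih =>
    intro fA frontier sn st d r r' hnt hsub hd' hA hB
    cases frontier with
    | nil =>
      simp only [loopB] at hB
      cases fA with
      | zero => simp [loopA] at hA
      | succ fA =>
        simp only [loopA] at hA
        cases hA; cases hB; rfl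
    | cons x fr =>
      by_cases hlt : fA < (x :: fr).length
      · rw [show (x :: fr : List (List Bool)) = (x :: fr) ++ [] by simp] at hA
        rw [loopA_short target bs fA (x :: fr) [] sn st hlt hnt] at hA
        cases hA
      · obtain ⟨g, hg⟩ : ∃ g, fA = (x :: fr).length + g := ⟨fA - (x :: fr).length, by omega⟩
        obtain ⟨st', hstep, hold', hnew'⟩ :=
          loopA_layer target bs d (x :: fr) [] g sn st hnt hsub hd'
        rw [List.append_nil, List.nil_append] at hstep
        rw [hg, hstep] at hA
        simp only [loopB] at hB
        have hsub2 : ∀ y ∈ (expandAll bs sn (x :: fr)).2, y ∈ (expandAll bs sn (x :: fr)).1 := by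
          intro y hy
          rw [expandAll_fst]
          exact List.mem_append_right _ hy
        by_cases ht : target ∈ (expandAll bs sn (x :: fr)).2
        · rw [if_pos ht] at hB
          cases hB
          exact loopA_found target bs (d + 1) g _ _ st' r ht hsub2 (hnew' target ht) hA
        · rw [if_neg ht] at hB
          exact ih g _ _ st' (d + 1) r r' ht hsub2 hnew' hA hB

theorem search_eq_level (start : List Bool) (target : List Bool) (buttons : List (List Int)) :
    search start target buttons = levelSearch start target buttons := by
  have hg0 : (PySem.Dict.ofList [(start, (0 : Int))]).getD start 0 = 0 := by
    rw [PySem.Dict.getD_eq_get?_getD,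
      show PySem.Dict.ofList [(start, (0 : Int))] = PySem.Dict.mk [(start, 0)] from rfl,
      PySem.Dict.get?_mk_cons]
    simp
  have hset : PySem.Set.ofList [start] = [start] := rfl
  by_cases h : start = target
  · unfold search levelSearch
    rw [if_pos h]
    rw [show 2 ^ start.length + 2 = (2 ^ start.length + 1) + 1 from rfl]
    simp only [loopA]
    rw [if_pos h, hg0]
  · unfold search levelSearch
    rw [if_neg h]
    have hnt : target ∉ ([start] : List (List Bool)) := by
      intro hc
      simp at hc
      exact h hc.symm
    have hA := loopA_ne_none target buttons start.length (2 ^ start.length + 2) [start]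
      (PySem.Set.ofList [start]) (PySem.Dict.ofList [(start, 0)])
      (by rw [hset]; simp) (by rw [hset]; simp) (by rw [hset]; simp) (by rw [hset]; simp only [List.length_singleton]; omega)
    have hB := loopB_ne_none target buttons start.length (2 ^ start.length + 2) [start]
      (PySem.Set.ofList [start]) 0
      (by rw [hset]; simp) (by rw [hset]; simp) (by rw [hset]; simp) (by rw [hset]; simp only [List.length_singleton]; omega)
    cases hA' : loopA target buttons (2 ^ start.length + 2) [start]
        (PySem.Set.ofList [start]) (PySem.Dict.ofList [(start, 0)]) with
    | none => exact absurd hA' hA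
    | some r =>
      cases hB' : loopB target buttons (2 ^ start.length + 2) [start]
          (PySem.Set.ofList [start]) 0 with
      | none => exact absurd hB' hB
      | some r' =>
        have := loopAB target buttons (2 ^ start.length + 2) (2 ^ start.length + 2)
          [start] (PySem.Set.ofList [start]) (PySem.Dict.ofList [(start, 0)]) 0 r r'
          hnt (by rw [hset]; simp)
          (by intro y hy; simp at hy; rw [hy]; exact hg0)
          hA' hB'
        dsimp only
        exact this

-- ---------- reachability semantics ----------

def applyWord (start : List Bool) (w : List (List Int)) : List Bool :=
  w.foldl (fun s b => pyApply b s) start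

-- reachable from start by a word over `buttons` of length ≤ k / < j
def Reach (buttons : List (List Int)) (start y : List Bool) (k : Nat) : Prop :=
  ∃ w : List (List Int), w.length ≤ k ∧ (∀ b ∈ w, b ∈ buttons) ∧ applyWord start w = y

def ReachLt (buttons : List (List Int)) (start y : List Bool) (j : Nat) : Prop :=
  ∃ w : List (List Int), w.length < j ∧ (∀ b ∈ w, b ∈ buttons) ∧ applyWord start w = y

theorem Reach_mono (bs : List (List Int)) (start y : List Bool) {i k : Nat} (h : i ≤ k) :
    Reach bs start y i → Reach bs start y k := by
  rintro ⟨w, h1, h2, h3⟩; exact ⟨w, le_trans h1 h, h2, h3⟩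

theorem Reach_zero (bs : List (List Int)) (start y : List Bool) :
    Reach bs start y 0 ↔ y = start := by
  constructor
  · rintro ⟨w, h1, _, h3⟩
    rw [List.length_eq_zero_iff.mp (Nat.le_zero.mp h1)] at h3
    exact h3.symm.trans rfl
  · rintro rfl; exact ⟨[], by simp, by simp, rfl⟩

theorem ReachLt_succ (bs : List (List Int)) (start y : List Bool) (j : Nat) :
    ReachLt bs start y (j + 1) ↔ Reach bs start y j := by
  constructor
  · rintro ⟨w, h1, h2, h3⟩; exact ⟨w, by omega, h2, h3⟩
  · rintro ⟨w, h1, h2, h3⟩; exact ⟨w, by omega, h2, h3⟩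

theorem ReachLt_imp_Reach (bs : List (List Int)) (start y : List Bool) (j : Nat) :
    ReachLt bs start y j → Reach bs start y j := by
  rintro ⟨w, h1, h2, h3⟩; exact ⟨w, by omega, h2, h3⟩

theorem applyWord_append_one (start : List Bool) (w : List (List Int)) (b : List Int) :
    applyWord start (w ++ [b]) = pyApply b (applyWord start w) := by
  simp [applyWord]

-- membership in the freshly discovered lists
theorem mem_expandOne_snd : ∀ (bs : List (List Int)) (sn : PySem.Set (List Bool)) (x y : List Bool),
    y ∈ (expandOne bs sn x).2 ↔ y ∉ sn ∧ ∃ b ∈ bs, pyApply b x = y := by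
  intro bs
  induction bs with
  | nil => intro sn x y; simp [expandOne]
  | cons b bs ih =>
    intro sn x y
    simp only [expandOne]
    by_cases hm : pyApply b x ∈ sn
    · rw [if_pos hm, ih]
      simp only [List.mem_cons]
      constructor
      · rintro ⟨h1, b', hb', h3⟩
        exact ⟨h1, b', Or.inr hb', h3⟩
      · rintro ⟨h1, b', (rfl | hb'), h3⟩
        · exact absurd (h3 ▸ hm) h1
        · exact ⟨h1, b', hb', h3⟩
    · rw [if_neg hm]
      simp only [List.mem_cons, ih, List.mem_append, List.mem_singleton]
      constructor
      · rintro (rfl | ⟨h1, b', hb', h3⟩)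
        · exact ⟨hm, b, Or.inl rfl, rfl⟩
        · exact ⟨fun hc => h1 (Or.inl hc), b', Or.inr hb', h3⟩
      · rintro ⟨h1, b', (rfl | hb'), h3⟩
        · exact Or.inl h3.symm
        · by_cases hy : y = pyApply b x
          · exact Or.inl hy
          · exact Or.inr ⟨fun hc => hc.elim h1 (fun hc2 => hy (by simpa using hc2)), b', hb', h3⟩

theorem mem_expandAll_snd : ∀ (fr : List (List Bool)) (bs : List (List Int)) (sn : PySem.Set (List Bool)) (y : List Bool),
    y ∈ (expandAll bs sn fr).2 ↔ y ∉ sn ∧ ∃ x ∈ fr, ∃ b ∈ bs, pyApply b x = y := by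
  intro fr
  induction fr with
  | nil => intro bs sn y; simp [expandAll]
  | cons x fr ih =>
    intro bs sn y
    simp only [expandAll, List.mem_append]
    constructor
    · rintro (h | h)
      · obtain ⟨h1, b, hb, h3⟩ := (mem_expandOne_snd bs sn x y).mp h
        exact ⟨h1, x, (by simp), b, hb, h3⟩
      · obtain ⟨h1, x', hx', b, hb, h3⟩ := (ih bs (expandOne bs sn x).1 y).mp h
        rw [expandOne_fst] at h1
        exact ⟨fun hc => h1 (List.mem_append_left _ hc), x', List.mem_cons_of_mem _ hx', b, hb, h3⟩
    · rintro ⟨h1, x', hx', b, hb, h3⟩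
      by_cases hy : y ∈ (expandOne bs sn x).2
      · exact Or.inl hy
      · cases List.mem_cons.mp hx' with
        | inl h => exact Or.inl ((mem_expandOne_snd bs sn x y).mpr ⟨h1, b, hb, h ▸ h3⟩)
        | inr h =>
          refine Or.inr ((ih bs (expandOne bs sn x).1 y).mpr ⟨?_, x', h, b, hb, h3⟩)
          rw [expandOne_fst]
          intro hc
          rcases List.mem_append.mp hc with hc | hc
          · exact h1 hc
          · exact hy hc

-- if the current layer is closed (everything reachable at depth j was already seen earlier),
-- then nothing new is ever reachable
theorem closed_unreachable (bs : List (List Int)) (start : List Bool) (j : Nat)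
    (hcl : ∀ y, Reach bs start y j → ReachLt bs start y j) :
    ∀ w : List (List Int), (∀ b ∈ w, b ∈ bs) → ReachLt bs start (applyWord start w) j := by
  intro w
  induction w using List.reverseRecOn with
  | nil =>
    intro _
    exact hcl start ⟨[], by simp, by simp, rfl⟩
  | append_singleton w b ih =>
    intro hw
    have hx := ih (fun b' hb' => hw b' (by simp [hb']))
    obtain ⟨u, hu1, hu2, hu3⟩ := hx
    have : Reach bs start (applyWord start (w ++ [b])) j := by
      refine ⟨u ++ [b], by simp; omega, ?_, ?_⟩
      · intro b' hb'
        rcases List.mem_append.mp hb' with h | h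
        · exact hu2 b' h
        · simp only [List.mem_singleton] at h
          exact h ▸ hw b (by simp)
      · rw [applyWord_append_one, applyWord_append_one, hu3]
    exact hcl _ this

-- the main correctness of the layered loop, by induction on fuel
theorem loopB_correct (target start : List Bool) (bs : List (List Int)) :
    ∀ (f : Nat) (F : List (List Bool)) (sn : PySem.Set (List Bool)) (j : Nat) (r : Option Int),
    (∀ y, y ∈ sn ↔ Reach bs start y j) →
    (∀ y, y ∈ F ↔ (Reach bs start y j ∧ ¬ ReachLt bs start y j)) →
    ¬ Reach bs start target j →
    loopB target bs f F sn (j : Int) = some r →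
    ((∀ k, ¬ Reach bs start target k) → r = none) ∧
    (∀ m, Reach bs start target m → (∀ i, i < m → ¬ Reach bs start target i) → r = some (m : Int)) := by
  intro f
  induction f with
  | zero => intro F sn j r _ _ _ h; simp [loopB] at h
  | succ f ih =>
    intro F sn j r hS hF hT h
    cases F with
    | nil =>
      simp only [loopB, Option.some.injEq] at h
      subst h
      refine ⟨fun _ => rfl, ?_⟩
      intro m hm _
      exfalso
      have hcl : ∀ y, Reach bs start y j → ReachLt bs start y j := by
        intro y hy
        by_contra hny
        have : y ∈ ([] : List (List Bool)) := (hF y).mpr ⟨hy, hny⟩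
        simp at this
      obtain ⟨w, _, hw2, hw3⟩ := hm
      have := closed_unreachable bs start j hcl w hw2
      rw [hw3] at this
      exact hT (ReachLt_imp_Reach _ _ _ _ this)
    | cons x fr =>
      simp only [loopB] at h
      have hnew : ∀ y, y ∈ (expandAll bs sn (x :: fr)).2 ↔
          (Reach bs start y (j + 1) ∧ ¬ Reach bs start y j) := by
        intro y
        rw [mem_expandAll_snd]
        constructor
        · rintro ⟨h1, x', hx', b, hb, h3⟩
          have hy_notj : ¬ Reach bs start y j := fun hc => h1 ((hS y).mpr hc)
          obtain ⟨hx'R, _⟩ := (hF x').mp hx'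
          obtain ⟨w, hw1, hw2, hw3⟩ := hx'R
          refine ⟨⟨w ++ [b], by simp; omega, ?_, ?_⟩, hy_notj⟩
          · intro b' hb'
            rcases List.mem_append.mp hb' with hh | hh
            · exact hw2 b' hh
            · simp only [List.mem_singleton] at hh
              exact hh ▸ hb
          · rw [applyWord_append_one, hw3, h3]
        · rintro ⟨h1, h2⟩
          refine ⟨fun hc => h2 ((hS y).mp hc), ?_⟩
          obtain ⟨w, hw1, hw2, hw3⟩ := h1
          rcases w.eq_nil_or_concat with rfl | ⟨w', b, rfl⟩
          · exfalso
            apply h2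
            rw [show y = start from hw3.symm]
            exact ⟨[], by simp, by simp, rfl⟩
          · rw [List.concat_eq_append] at hw1 hw2 hw3
            have hx'j : Reach bs start (applyWord start w') j :=
              ⟨w', by simp at hw1; omega, fun b' hb' => hw2 b' (List.mem_append_left _ hb'), rfl⟩
            have hx'lt : ¬ ReachLt bs start (applyWord start w') j := by
              rintro ⟨u, hu1, hu2, hu3⟩
              apply h2
              refine ⟨u ++ [b], by simp; omega, ?_, ?_⟩
              · intro b' hb'
                rcases List.mem_append.mp hb' with hh | hh
                · exact hu2 b' hh
                · simp only [List.mem_singleton] at hh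
                  exact hh ▸ hw2 b (by simp)
              · rw [applyWord_append_one, hu3, ← applyWord_append_one, hw3]
            have hx'F : applyWord start w' ∈ x :: fr := (hF _).mpr ⟨hx'j, hx'lt⟩
            exact ⟨applyWord start w', hx'F, b, hw2 b (by simp),
              by rw [← applyWord_append_one, hw3]⟩
      by_cases ht : target ∈ (expandAll bs sn (x :: fr)).2
      · rw [if_pos ht, Option.some.injEq] at h
        subst h
        obtain ⟨htc1, htc2⟩ := (hnew target).mp ht
        constructor
        · intro hall; exact absurd htc1 (hall (j + 1))
        · intro m hm hmin
          have hmge : j + 1 ≤ m := by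
            by_contra hlt
            push_neg at hlt
            exact htc2 (Reach_mono _ _ _ (by omega) hm)
          have hmle : m ≤ j + 1 := by
            by_contra hgt
            push_neg at hgt
            exact hmin (j + 1) (by omega) htc1
          have hmj : m = j + 1 := le_antisymm hmle hmge
          subst hmj
          push_cast
          rfl
      · rw [if_neg ht] at h
        have hcast : ((j : Int) + 1) = ((j + 1 : Nat) : Int) := by push_cast; ring
        rw [hcast] at h
        refine ih (expandAll bs sn (x :: fr)).2 (expandAll bs sn (x :: fr)).1 (j + 1) r
          ?_ ?_ ?_ h
        · intro y
          rw [expandAll_fst, List.mem_append, hS y, hnew y]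
          constructor
          · rintro (hh | hh)
            · exact Reach_mono _ _ _ (by omega) hh
            · exact hh.1
          · intro hh
            by_cases hj : Reach bs start y j
            · exact Or.inl hj
            · exact Or.inr ⟨hh, hj⟩
        · intro y
          rw [hnew y, ReachLt_succ]
        · intro hc
          exact ht ((hnew target).mpr ⟨hc, hT⟩)

-- ---------- xor algebra for the subset side ----------

theorem xorRow_right_comm : ∀ (a b c : List Bool),
    xorRow (xorRow a b) c = xorRow (xorRow a c) b := by
  intro a
  induction a with
  | nil => intro b c; simp [xorRow]
  | cons x a ih =>
    intro b c
    cases b with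
    | nil => simp [xorRow]
    | cons y b =>
      cases c with
      | nil => simp [xorRow]
      | cons z c =>
        simp only [xorRow, List.zipWith_cons_cons] at *
        rw [ih b c]
        congr 1
        cases x <;> cases y <;> cases z <;> rfl

theorem xorRow_cancel : ∀ (d a : List Bool), d.length = a.length →
    xorRow (xorRow d a) a = d := by
  intro d
  induction d with
  | nil => intro a h; simp [xorRow]
  | cons x d ih =>
    intro a h
    cases a with
    | nil => simp at h
    | cons y a =>
      simp only [xorRow, List.zipWith_cons_cons]
      rw [show List.zipWith (fun x y => x != y) (List.zipWith (fun x y => x != y) d a) a = d from ih a (by simpa using h)]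
      congr 1
      cases x <;> cases y <;> rfl

theorem length_xorRow (a b : List Bool) : (xorRow a b).length = min a.length b.length := by
  simp [xorRow]

theorem foldl_xorRow_const : ∀ (ws : List (List Bool)) (a c : List Bool),
    List.foldl xorRow (xorRow a c) ws = xorRow (List.foldl xorRow a ws) c := by
  intro ws
  induction ws with
  | nil => intro a c; rfl
  | cons m ws ih =>
    intro a c
    simp only [List.foldl_cons]
    rw [xorRow_right_comm a c m, ih]

theorem eq_iff_xorRow_any : ∀ (a b : List Bool), a.length = b.length →
    (a = b ↔ (xorRow a b).any (fun x => x) = false) := by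
  intro a
  induction a with
  | nil =>
    intro b h
    cases b with
    | nil => simp [xorRow]
    | cons y b => simp at h
  | cons x a ih =>
    intro b h
    cases b with
    | nil => simp at h
    | cons y b =>
      have h' : a.length = b.length := by simpa using h
      constructor
      · intro hc
        injection hc with h1 h2
        have h3 := (ih b h').mp h2
        simp only [xorRow, List.zipWith_cons_cons, List.any_cons]
        simp only [xorRow] at h3
        simp [h1, h3]
      · intro hc
        simp only [xorRow, List.zipWith_cons_cons, List.any_cons, Bool.or_eq_false_iff] at hc
        obtain ⟨h1, h2⟩ := hc
        have hx : x = y := by cases x <;> cases y <;> simp_all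
        have ha : a = b := (ih b h').mpr (by simpa [xorRow] using h2)
        rw [hx, ha]

-- ---------- bridging words to button subsets ----------

theorem length_applyWord : ∀ (w : List (List Int)) (s : List Bool),
    (applyWord s w).length = s.length := by
  intro w
  induction w with
  | nil => intro s; rfl
  | cons b w ih =>
    intro s
    show (applyWord (pyApply b s) w).length = s.length
    rw [ih, length_pyApply]

theorem length_foldl_xorRow : ∀ (ws : List (List Bool)) (a : List Bool),
    (∀ x ∈ ws, x.length = a.length) → (List.foldl xorRow a ws).length = a.length := by
  intro ws
  induction ws with
  | nil => intro a _; rfl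
  | cons m ws ih =>
    intro a hl
    simp only [List.foldl_cons]
    have h1 : (xorRow a m).length = a.length := by
      rw [length_xorRow, hl m (by simp)]; omega
    rw [← h1]
    exact ih _ (fun x hx => by rw [h1, hl x (by simp [hx])])

def effMask (n : Nat) (b : List Int) : List Bool :=
  (List.range n).map (fun i => decide ((i : Int) ∈ b))

theorem length_effMask (n : Nat) (b : List Int) : (effMask n b).length = n := by
  simp [effMask]

theorem apply_eq_mask (b : List Int) (s : List Bool) :
    pyApply b s = xorRow s (effMask s.length b) := by
  have hxor : ∀ p q : Bool, xor p q = (p != q) := by decide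
  apply List.ext_getElem
  · rw [length_pyApply, length_xorRow, length_effMask]; omega
  · intro i h1 h2
    simp only [pyApply, xorRow, effMask, List.getElem_map, List.getElem_zipWith,
      PySem.List.getElem_enumerate, List.getElem_range, hxor]
    simp
    simp [← List.map_eq_flatMap]

theorem applyWord_eq_fold (n : Nat) : ∀ (w : List (List Int)) (s : List Bool), s.length = n →
    applyWord s w = List.foldl xorRow s (w.map (effMask n)) := by
  intro w
  induction w with
  | nil => intro s _; rfl
  | cons b w ih =>
    intro s hs
    show applyWord (pyApply b s) w = _
    simp only [List.map_cons, List.foldl_cons]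
    rw [ih _ (by rw [length_pyApply, hs]), apply_eq_mask, hs]

theorem word_iff (n : Nat) (start target : List Bool) (w : List (List Int))
    (hs : start.length = n) (ht : target.length = n) :
    applyWord start w = target ↔
      (List.foldl xorRow (xorRow start target) (w.map (effMask n))).any (fun x => x) = false := by
  have hlm : ∀ x ∈ w.map (effMask n), x.length = start.length := by
    intro x hx
    obtain ⟨b, _, rfl⟩ := List.mem_map.mp hx
    rw [length_effMask, hs]
  rw [applyWord_eq_fold n w start hs,
    eq_iff_xorRow_any _ _ (by rw [length_foldl_xorRow _ _ hlm, hs, ht]),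
    ← foldl_xorRow_const]

theorem combos_mem {α : Type} : ∀ (l : List α) (k : Nat) (c : List α),
    c ∈ combos l k ↔ List.Sublist c l ∧ c.length = k := by
  intro l
  induction l with
  | nil =>
    intro k c
    cases k with
    | zero =>
      simp only [combos, List.mem_singleton]
      constructor
      · rintro rfl; exact ⟨List.Sublist.refl _, rfl⟩
      · rintro ⟨h, _⟩; exact List.sublist_nil.mp h
    | succ k =>
      simp only [combos, List.not_mem_nil, false_iff, not_and]
      intro h
      rw [List.sublist_nil.mp h]
      simp
  | cons x rest ih =>
    intro k c
    cases k with
    | zero =>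
      simp only [combos, List.mem_singleton]
      constructor
      · rintro rfl; exact ⟨List.nil_sublist _, rfl⟩
      · rintro ⟨_, h⟩; exact List.length_eq_zero_iff.mp h
    | succ k =>
      simp only [combos, List.mem_append, List.mem_map]
      constructor
      · rintro (⟨c', hc', rfl⟩ | hc)
        · obtain ⟨h1, h2⟩ := (ih k c').mp hc'
          exact ⟨List.Sublist.cons₂ x h1, by simp [h2]⟩
        · obtain ⟨h1, h2⟩ := (ih (k + 1) c).mp hc
          exact ⟨List.Sublist.cons x h1, h2⟩
      · rintro ⟨hsub, hlen⟩
        cases hsub with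
        | cons _ h => exact Or.inr ((ih (k + 1) c).mpr ⟨h, hlen⟩)
        | cons₂ _ h =>
          rename_i c'
          exact Or.inl ⟨c', (ih k c').mpr ⟨h, by simpa using hlen⟩, rfl⟩

theorem foldl_xorRow_perm {l₁ l₂ : List (List Bool)} (p : l₁.Perm l₂) :
    ∀ a, List.foldl xorRow a l₁ = List.foldl xorRow a l₂ := by
  induction p with
  | nil => intro a; rfl
  | cons x _ ih => intro a; simp only [List.foldl_cons]; exact ih _
  | swap x y l => intro a; simp only [List.foldl_cons]; rw [xorRow_right_comm]
  | trans _ _ ih1 ih2 => intro a; exact (ih1 a).trans (ih2 a)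

theorem cancel_to_sublist (masks : List (List Bool)) (n : Nat)
    (hm : ∀ x ∈ masks, x.length = n) (diff : List Bool) (hd : diff.length = n) :
    ∀ (N : Nat) (ws : List (List Bool)), ws.length ≤ N → (∀ x ∈ ws, x ∈ masks) →
    ∃ c, List.Sublist c masks ∧ c.length ≤ ws.length ∧
      List.foldl xorRow diff c = List.foldl xorRow diff ws := by
  intro N
  induction N with
  | zero =>
    intro ws hN _
    rw [List.length_eq_zero_iff.mp (Nat.le_zero.mp hN)]
    exact ⟨[], List.nil_sublist _, by simp, rfl⟩
  | succ N ih =>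
    intro ws hN hsubm
    by_cases hnd : ws.Nodup
    · obtain ⟨c, hc1, hc2⟩ := List.subperm_of_subset hnd (fun x hx => hsubm x hx)
      exact ⟨c, hc2, by rw [hc1.length_eq], foldl_xorRow_perm hc1 diff⟩
    · have hcnt : ∃ a, 2 ≤ ws.count a := by
        by_contra hc
        push_neg at hc
        exact hnd (List.nodup_iff_count_le_one.mpr (fun a => by have := hc a; omega))
      obtain ⟨a, ha2⟩ := hcnt
      have ha : a ∈ ws := List.count_pos_iff.mp (by omega)
      have ha' : a ∈ ws.erase a := by
        apply List.count_pos_iff.mp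
        rw [List.count_erase_self]
        omega
      have hA : ws.Perm (a :: a :: (ws.erase a).erase a) :=
        (List.perm_cons_erase ha).trans ((List.perm_cons_erase ha').cons a)
      have hla : diff.length = a.length := by rw [hd, hm a (hsubm a ha)]
      have hfold : List.foldl xorRow diff ws
          = List.foldl xorRow diff ((ws.erase a).erase a) := by
        rw [foldl_xorRow_perm hA diff]
        simp only [List.foldl_cons]
        rw [xorRow_cancel diff a hla]
      have hlen2 : ((ws.erase a).erase a).length + 2 = ws.length := by
        have h1 : 1 ≤ ws.length := List.length_pos_of_mem ha
        have h2 : 1 ≤ (ws.erase a).length := List.length_pos_of_mem ha'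
        rw [List.length_erase_of_mem ha] at h2
        rw [List.length_erase_of_mem ha', List.length_erase_of_mem ha]
        omega
      obtain ⟨c, hc1, hc2, hc3⟩ := ih ((ws.erase a).erase a) (by omega)
        (fun x hx => hsubm x (List.mem_of_mem_erase (List.mem_of_mem_erase hx)))
      exact ⟨c, hc1, by omega, hc3.trans hfold.symm⟩

-- ---------- characterising findK ----------

def SubP (masks : List (List Bool)) (diff : List Bool) (k : Nat) : Prop :=
  ∃ c, List.Sublist c masks ∧ c.length = k ∧
    (List.foldl xorRow diff c).any (fun x => x) = false

theorem SubP_iff_any (masks : List (List Bool)) (diff : List Bool) (k : Nat) :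
    ((combos masks k).any (fun c => !((c.foldl xorRow diff).any (fun x => x)))) = true
      ↔ SubP masks diff k := by
  rw [List.any_eq_true]
  constructor
  · rintro ⟨c, hc, hb⟩
    obtain ⟨h1, h2⟩ := (combos_mem masks k c).mp hc
    exact ⟨c, h1, h2, by simpa using hb⟩
  · rintro ⟨c, h1, h2, h3⟩
    exact ⟨c, (combos_mem masks k c).mpr ⟨h1, h2⟩, by simpa using h3⟩

theorem findK_none (masks : List (List Bool)) (diff : List Bool)
    (h : ∀ k, ¬ SubP masks diff k) :
    ∀ ks, findK masks diff ks = none := by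
  intro ks
  induction ks with
  | nil => rfl
  | cons k ks ih =>
    simp only [findK]
    rw [if_neg (fun hc => h k ((SubP_iff_any masks diff k).mp hc)), ih]

theorem findK_min (masks : List (List Bool)) (diff : List Bool) (m : Nat)
    (hm : SubP masks diff m) (hmin : ∀ i, i < m → ¬ SubP masks diff i) :
    ∀ (cnt a : Nat), a ≤ m → m < a + cnt →
    findK masks diff (List.range' a cnt) = some (m : Int) := by
  intro cnt
  induction cnt with
  | zero => intro a h1 h2; omega
  | succ cnt ih =>
    intro a h1 h2
    show findK masks diff (a :: List.range' (a + 1) cnt) = some (m : Int)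
    by_cases ham : a = m
    · subst ham
      simp only [findK]
      rw [if_pos ((SubP_iff_any masks diff a).mpr hm)]
    · simp only [findK]
      rw [if_neg (fun hc => hmin a (by omega) ((SubP_iff_any masks diff a).mp hc))]
      exact ih (a + 1) (by omega) (by omega)

-- ---------- Reach ↔ SubP ----------

theorem SubP_to_Reach (start target : List Bool) (buttons : List (List Int)) (k : Nat)
    (ht : target.length = start.length)
    (h : SubP (buttons.map (effMask start.length)) (xorRow start target) k) :
    Reach buttons start target k := by
  obtain ⟨c, hsub, hlen, hfold⟩ := h
  obtain ⟨w, hw, rfl⟩ := List.sublist_map_iff.mp hsub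
  refine ⟨w, by simp at hlen; omega, fun b hb => hw.subset hb, ?_⟩
  exact (word_iff start.length start target w rfl ht).mpr hfold

theorem Reach_to_SubP (start target : List Bool) (buttons : List (List Int)) (k : Nat)
    (ht : target.length = start.length)
    (h : Reach buttons start target k) :
    ∃ k' ≤ k, SubP (buttons.map (effMask start.length)) (xorRow start target) k' := by
  obtain ⟨w, hw1, hw2, hw3⟩ := h
  have hfold := (word_iff start.length start target w rfl ht).mp hw3
  obtain ⟨c, hc1, hc2, hc3⟩ := cancel_to_sublist (buttons.map (effMask start.length))
    start.length
    (by rintro x hx; obtain ⟨b, _, rfl⟩ := List.mem_map.mp hx; exact length_effMask _ _)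
    (xorRow start target)
    (by rw [length_xorRow, ht]; omega)
    (w.map (effMask start.length)).length (w.map (effMask start.length)) le_rfl
    (fun x hx => by
      obtain ⟨b, hb, rfl⟩ := List.mem_map.mp hx
      exact List.mem_map_of_mem (hw2 b hb))
  refine ⟨c.length, ?_, c, hc1, rfl, by rw [hc3]; exact hfold⟩
  simpa using le_trans hc2 (by simpa using hw1)

-- evaluating the layered loop from its initial state
theorem level_loop_eval (start target : List Bool) (buttons : List (List Int))
    (hst : start ≠ target) :
    ∃ r, loopB target buttons (2 ^ start.length + 2) [start] (PySem.Set.ofList [start]) 0 = some r ∧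
      ((∀ k, ¬ Reach buttons start target k) → r = none) ∧
      (∀ m, Reach buttons start target m →
        (∀ i, i < m → ¬ Reach buttons start target i) → r = some (m : Int)) := by
  have hset : PySem.Set.ofList [start] = [start] := rfl
  have hB := loopB_ne_none target buttons start.length (2 ^ start.length + 2) [start]
    (PySem.Set.ofList [start]) 0
    (by rw [hset]; simp) (by rw [hset]; simp) (by rw [hset]; simp)
    (by rw [hset]; simp only [List.length_singleton]; omega)
  cases hB' : loopB target buttons (2 ^ start.length + 2) [start]
      (PySem.Set.ofList [start]) 0 with
  | none => exact absurd hB' hB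
  | some r =>
    refine ⟨r, rfl, ?_⟩
    refine loopB_correct target start buttons (2 ^ start.length + 2) [start]
      (PySem.Set.ofList [start]) 0 r ?_ ?_ ?_ (by exact_mod_cast hB')
    · intro y
      rw [hset, Reach_zero]
      simp only [List.mem_singleton]
    · intro y
      rw [Reach_zero]
      simp only [List.mem_singleton]
      constructor
      · intro h
        refine ⟨h, ?_⟩
        rintro ⟨w, hw, _, _⟩
        omega
      · exact And.left
    · rw [Reach_zero]
      exact fun hc => hst hc.symm

-- ===== VERDICT (by name: the statement is the Claim_ definition above) =====
theorem search_spec : Claim_equal_search := by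
  classical
  intro start target buttons _
  unfold Spec_search
  rw [search_eq_level]
  by_cases hlen : target.length = start.length
  · by_cases hst : start = target
    · have h0 : levelSearch start target buttons = some 0 := by
        unfold levelSearch; rw [if_pos hst]
      rw [h0]
      unfold search_alt
      rw [if_neg (not_not_intro hlen)]
      show some (0 : Int) = findK (buttons.map (effMask start.length)) (xorRow start target)
        (List.range (buttons.length + 1))
      have hsub0 : SubP (buttons.map (effMask start.length)) (xorRow start target) 0 := by
        refine ⟨[], List.nil_sublist _, rfl, ?_⟩
        exact (eq_iff_xorRow_any start target hlen.symm).mp hst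
      rw [List.range_eq_range']
      exact_mod_cast (findK_min (buttons.map (effMask start.length)) (xorRow start target) 0 hsub0
        (fun i hi => by omega) (buttons.length + 1) 0 (le_refl 0) (by omega)).symm
    · obtain ⟨r, hr, hnone, hsome⟩ := level_loop_eval start target buttons hst
      have hlev : levelSearch start target buttons = r := by
        unfold levelSearch
        rw [if_neg hst, hr]
      rw [hlev]
      unfold search_alt
      rw [if_neg (not_not_intro hlen)]
      show r = findK (buttons.map (effMask start.length)) (xorRow start target)
        (List.range (buttons.length + 1))
      rw [List.range_eq_range']
      by_cases hex : ∃ k, Reach buttons start target k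
      · have hspec := Nat.find_spec hex
        have hmin : ∀ i, i < Nat.find hex → ¬ Reach buttons start target i :=
          fun i hi => Nat.find_min hex hi
        rw [hsome (Nat.find hex) hspec hmin]
        have hexS : ∃ k, SubP (buttons.map (effMask start.length)) (xorRow start target) k := by
          obtain ⟨k', _, hk'⟩ := Reach_to_SubP start target buttons (Nat.find hex) hlen hspec
          exact ⟨k', hk'⟩
        have hminS : ∀ i, i < Nat.find hexS →
            ¬ SubP (buttons.map (effMask start.length)) (xorRow start target) i :=
          fun i hi => Nat.find_min hexS hi
        have heq : Nat.find hexS = Nat.find hex := by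
          have h1 : Nat.find hex ≤ Nat.find hexS :=
            Nat.find_min' hex (SubP_to_Reach start target buttons _ hlen (Nat.find_spec hexS))
          have h2 : Nat.find hexS ≤ Nat.find hex := by
            obtain ⟨k', hk'le, hk'⟩ := Reach_to_SubP start target buttons (Nat.find hex) hlen hspec
            exact le_trans (Nat.find_min' hexS hk') hk'le
          omega
        have hbound : Nat.find hexS < buttons.length + 1 := by
          obtain ⟨c, hc1, hc2, _⟩ := Nat.find_spec hexS
          have := hc1.length_le
          simp only [List.length_map] at this
          omega
        rw [← heq]
        exact_mod_cast (findK_min (buttons.map (effMask start.length)) (xorRow start target)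
          (Nat.find hexS) (Nat.find_spec hexS) hminS (buttons.length + 1) 0
          (Nat.zero_le _) (by omega)).symm
      · push_neg at hex
        rw [hnone hex]
        have hnoS : ∀ k, ¬ SubP (buttons.map (effMask start.length)) (xorRow start target) k :=
          fun k hk => hex k (SubP_to_Reach start target buttons k hlen hk)
        exact (findK_none (buttons.map (effMask start.length)) (xorRow start target)
          hnoS (List.range' 0 (buttons.length + 1))).symm
  · have hst : start ≠ target := fun hc => hlen (by rw [hc])
    obtain ⟨r, hr, hnone, _⟩ := level_loop_eval start target buttons hst
    have hlev : levelSearch start target buttons = r := by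
      unfold levelSearch
      rw [if_neg hst, hr]
    rw [hlev]
    unfold search_alt
    rw [if_pos (fun hc => hlen hc)]
    show r = none
    apply hnone
    rintro k ⟨w, _, _, hw3⟩
    apply hlen
    rw [← hw3, length_applyWord]
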